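-- pv_equiv track=rewrite | github.com/i-form-neo/lotus | lotus_bot/notes.py | _normalize_and_filter
-- ===== SOURCE A (Python) =====
-- def _normalize_and_filter(tags):
--     """Приймає iterable тегів та повертає унікальний список нормалізованих тегів"""
--     seen = set()
--     result = []
--     for tag in tags:
--         cleaned = tag.strip().lower()
--         if cleaned and cleaned not in seen:
--             seen.add(cleaned)
--             result.append(cleaned)
--     return result
-- ===== SOURCE B (Python) =====
-- def _normalize_and_filter(tags):
--     """Приймає iterable тегів та повертає унікальний список нормалізованих тегів"""
--     first = {}
--     for i, tag in enumerate(tags):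
--         cleaned = tag.strip().lower()
--         if cleaned:
--             first.setdefault(cleaned, i)
--     return sorted(first, key=lambda c: first[c])
-- ===== Notes on version B (the rewrite author's own statement) =====
-- stated objective: alternative
-- what changed: Instead of streaming results past a seen-set, B records each normalized tag's first occurrence index in a dict via setdefault (no membership branch, no result list) and reconstructs the output by sorting the keys by that index.
import Mathlib
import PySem

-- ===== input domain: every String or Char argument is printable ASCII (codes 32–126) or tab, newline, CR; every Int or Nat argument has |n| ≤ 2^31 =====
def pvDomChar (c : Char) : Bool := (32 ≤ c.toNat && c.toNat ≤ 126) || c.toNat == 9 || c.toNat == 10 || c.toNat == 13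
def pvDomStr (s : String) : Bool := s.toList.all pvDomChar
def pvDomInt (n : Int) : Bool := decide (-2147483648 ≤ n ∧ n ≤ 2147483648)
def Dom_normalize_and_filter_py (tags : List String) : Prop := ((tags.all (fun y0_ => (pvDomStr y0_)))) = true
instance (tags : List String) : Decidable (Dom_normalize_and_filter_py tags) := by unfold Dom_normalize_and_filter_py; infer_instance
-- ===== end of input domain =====

-- B replaces A's seen-set streaming pass by a first-occurrence-index dict (setdefault)
-- whose keys are then sorted by that index (alternative decomposition, not faster).

-- ===== PORT A =====
-- Port of A: fold over tags with (seen, result) state, exactly A's loop.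
def normalize_and_filter_py (tags : List String) : List String :=
  (tags.foldl (fun (st : PySem.Set String × List String) tag =>
      let cleaned := PySem.Str.lower (PySem.Str.strip tag)
      if cleaned ≠ "" ∧ ¬ PySem.Set.contains st.1 cleaned then
        (PySem.Set.add st.1 cleaned, st.2 ++ [cleaned])
      else st)
    (PySem.Set.empty, [])).2

-- ===== PORT B =====
-- Port of B: build the first-occurrence-index dict with setdefault over enumerate,
-- then sort its keys by that index. 'first[c]' on a key of the dict is getD c 0
-- (every sorted element is a key, so the default is never taken).
def normalize_and_filter_py_alt (tags : List String) : List String :=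
  let first := (PySem.List.enumerate tags 0).foldl
    (fun (d : PySem.Dict String Int) p =>
      let cleaned := PySem.Str.lower (PySem.Str.strip p.2)
      if cleaned ≠ "" then d.setdefault cleaned p.1 else d)
    PySem.Dict.empty
  PySem.List.sorted (PySem.Dict.keys first) (fun c => first.getD c 0) false

-- ===== PRECONDITION & SPEC =====
def Spec_normalize_and_filter_py (tags : List String) (out : List String) : Prop := out = normalize_and_filter_py_alt tags
instance (tags : List String) (out : List String) : Decidable (Spec_normalize_and_filter_py tags out) := by unfold Spec_normalize_and_filter_py; infer_instance

-- ===== CLAIM (what is proved, stated in full; the proofs are below) =====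
def Claim_equal_normalize_and_filter_py : Prop := ∀ (tags : List String), Dom_normalize_and_filter_py tags → Spec_normalize_and_filter_py tags (normalize_and_filter_py tags)

-- ===== LEMMAS AND PROOFS =====

-- abbreviation used only in the proofs below
def nafpClean (t : String) : String := PySem.Str.lower (PySem.Str.strip t)

def nafpStep (d : PySem.Dict String Int) (p : Int × String) : PySem.Dict String Int :=
  if nafpClean p.2 ≠ "" then d.setdefault (nafpClean p.2) p.1 else d

-- A's fold with the invariant seen = result = r: it appends the fresh nonempty cleaned tags.
lemma nafp_key (xs : List String) (r : List String) :
    (xs.foldl (fun (st : PySem.Set String × List String) tag =>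
       let cleaned := nafpClean tag
       if cleaned ≠ "" ∧ ¬ PySem.Set.contains st.1 cleaned then
         (PySem.Set.add st.1 cleaned, st.2 ++ [cleaned])
       else st) (r, r)).2
    = xs.foldl (fun s t => if nafpClean t ≠ "" then PySem.Set.add s (nafpClean t) else s) r := by
  induction xs generalizing r with
  | nil => rfl
  | cons t ts ih =>
    simp only [List.foldl_cons]
    set c := nafpClean t with hc
    have hstep :
        (let cleaned := c;
         if cleaned ≠ "" ∧ ¬ ((r, r) : PySem.Set String × List String).1.contains cleaned = true then
           (PySem.Set.add (r, r).1 cleaned, (r, r).2 ++ [cleaned])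
         else (r, r))
        = ((if c ≠ "" then PySem.Set.add r c else r : PySem.Set String),
           (if c ≠ "" then PySem.Set.add r c else r : List String)) := by
      by_cases h1 : c = ""
      · simp [h1]
      · by_cases h2 : c ∈ r
        · simp [h1, h2, PySem.Set.add]
        · simp [h1, h2, PySem.Set.add]
    rw [hstep]
    split <;> exact ih _

-- A's result is the ordered set of the nonempty cleaned tags.
lemma nafp_A_char (tags : List String) :
    normalize_and_filter_py tags
      = PySem.Set.ofList ((tags.map nafpClean).filter (fun c => c ≠ "")) := by
  unfold normalize_and_filter_py
  rw [PySem.Set.ofList_eq_foldl]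
  have h := nafp_key tags []
  simp only [nafpClean] at h
  simp only [List.foldl_filter, List.foldl_map]
  simpa [PySem.Set.empty] using h

-- The keys of B's dict fold extend the accumulator's keys by the same ordered set.
lemma nafp_keys (xs : List String) (i : Int) (d : PySem.Dict String Int) :
    ((PySem.List.enumerate xs i).foldl nafpStep d).keys
      = PySem.Set.update d.keys ((xs.map nafpClean).filter (fun c => c ≠ "")) := by
  induction xs generalizing i d with
  | nil => simp [PySem.List.enumerate_nil, PySem.Set.update]
  | cons x xs ih =>
    rw [PySem.List.enumerate_cons, List.foldl_cons, List.map_cons, List.filter_cons]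
    by_cases hx : nafpClean x = ""
    · rw [if_neg (by simp [hx]), nafpStep, if_neg (by simpa using hx)]
      exact ih (i + 1) d
    · rw [if_pos (by simpa using hx), nafpStep, if_pos (by simpa using hx)]
      rw [ih (i + 1) (d.setdefault (nafpClean x) i)]
      have : (d.setdefault (nafpClean x) i).keys = PySem.Set.add d.keys (nafpClean x) := by
        by_cases hc : d.contains (nafpClean x)
        · rw [PySem.Dict.setdefault_of_contains _ _ hc, PySem.Set.add,
            if_pos (by simpa [PySem.Set.contains, PySem.Dict.contains_iff_mem_keys] using hc)]
        · rw [PySem.Dict.setdefault_of_not_contains _ _ (by simpa using hc),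
            PySem.Dict.keys_insert_of_not_contains _ _ (by simpa using hc), PySem.Set.add,
            if_neg (by simpa [PySem.Set.contains, PySem.Dict.contains_iff_mem_keys] using hc)]
      rw [this]
      rfl

-- B's dict fold keeps the stored first indices strictly increasing along the items list.
lemma nafp_inc (xs : List String) (i : Int) (d : PySem.Dict String Int)
    (hp : d.items.Pairwise (fun p q => p.2 < q.2))
    (hb : ∀ p ∈ d.items, p.2 < i) :
    ((PySem.List.enumerate xs i).foldl nafpStep d).items.Pairwise (fun p q => p.2 < q.2) := by
  induction xs generalizing i d with
  | nil => simpa [PySem.List.enumerate_nil] using hp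
  | cons x xs ih =>
    rw [PySem.List.enumerate_cons, List.foldl_cons]
    rw [show nafpStep d (i, x)
        = if nafpClean x ≠ "" then d.setdefault (nafpClean x) i else d from rfl]
    by_cases hx : nafpClean x = ""
    · rw [if_neg (by simpa using hx)]
      exact ih (i + 1) d hp (fun p hpmem => lt_trans (hb p hpmem) (by omega))
    · rw [if_pos (by simpa using hx)]
      by_cases hc : d.contains (nafpClean x)
      · rw [PySem.Dict.setdefault_of_contains _ _ hc]
        exact ih (i + 1) d hp (fun p hpmem => lt_trans (hb p hpmem) (by omega))
      · rw [PySem.Dict.setdefault_of_not_contains _ _ (by simpa using hc)]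
        refine ih (i + 1) _ ?_ ?_
        · rw [PySem.Dict.items_insert_of_not_contains _ _ (by simpa using hc)]
          exact List.pairwise_append.2 ⟨hp, by simp, by
            intro p hpmem q hqmem
            simp only [List.mem_singleton] at hqmem
            subst hqmem
            exact hb p hpmem⟩
        · intro p hpmem
          rw [PySem.Dict.items_insert_of_not_contains _ _ (by simpa using hc)] at hpmem
          rcases List.mem_append.1 hpmem with h | h
          · exact lt_trans (hb p h) (by omega)
          · simp only [List.mem_singleton] at h; subst h; simp

theorem normalize_and_filter_py_spec : Claim_equal_normalize_and_filter_py := by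
  intro tags _
  unfold Spec_normalize_and_filter_py normalize_and_filter_py_alt
  rw [show (fun (d : PySem.Dict String Int) (p : Int × String) =>
      let cleaned := PySem.Str.lower (PySem.Str.strip p.2)
      if cleaned ≠ "" then d.setdefault cleaned p.1 else d) = nafpStep from rfl]
  set d := (PySem.List.enumerate tags 0).foldl nafpStep PySem.Dict.empty with hd
  have hkeys : d.keys = PySem.Set.ofList ((tags.map nafpClean).filter (fun c => c ≠ "")) := by
    rw [hd, nafp_keys]
    simp [PySem.Dict.keys_empty, PySem.Set.update, PySem.Set.ofList_eq_foldl]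
  have hnodup : d.keys.Nodup := by rw [hkeys]; exact PySem.Set.nodup_ofList _
  have hitems : d.items.Pairwise (fun p q => p.2 < q.2) := by
    rw [hd]
    exact nafp_inc tags 0 PySem.Dict.empty (by simp [PySem.Dict.empty]) (by simp [PySem.Dict.empty])
  have hpair : d.keys.Pairwise (fun a b => d.getD a 0 ≤ d.getD b 0) := by
    have : d.items.Pairwise (fun p q => d.getD p.1 0 ≤ d.getD q.1 0) := by
      refine hitems.imp_of_mem ?_
      intro p q hpmem hqmem hlt
      rw [PySem.Dict.getD_of_mem_items _ (by simpa using hpmem) hnodup _,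
        PySem.Dict.getD_of_mem_items _ (by simpa using hqmem) hnodup _]
      exact le_of_lt hlt
    have hk : d.keys = d.items.map (·.1) := rfl
    rw [hk, List.pairwise_map]
    exact this
  rw [PySem.List.sorted_eq_self_of_pairwise _ _ hpair, hkeys, nafp_A_char]
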